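-- pv_equiv track=rewrite | github.com/Exclamation1/Covering-Code | matrix_method_cover.py | generator_from_parity_I_M
-- ===== SOURCE A (Python) =====
-- def generator_from_parity_I_M(m: int, M_rows):
--     """
--     Build a generator G of the nullspace of H = [I_m | M].
--     n = m + k, k = width(M).
--     Return list of generator row bitmasks (n-bit, MSB-first -> bitmask MSB at left).
--     """
--     m_ = m
--     k = len(M_rows[0]) if m_>0 else 0
--     n = m_ + k
--     # Standard form for H = [I | M] over GF(2):
--     # Nullspace has dimension k; one basis is rows: [M^T | I_k]
--     # Proof: H * [M^T | I] ^T = I*M^T + M*I = M^T + M^T = 0.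
--     # Build rows of length n, MSB-first -> convert to mask.
--     G_rows = []
--     # M^T rows:
--     for j in range(k):
--         row = []
--         # first m bits: column j of M (MSB-first)
--         for i in range(m):
--             row.append(M_rows[i][j])
--         # then k bits: identity at position j
--         for t in range(k):
--             row.append(1 if t==j else 0)
--         # to mask:
--         mask = 0
--         for b in row:
--             mask = (mask<<1) | b
--         G_rows.append(mask)
--     return G_rows, n
-- ===== SOURCE B (Python) =====
-- def generator_from_parity_I_M(m: int, M_rows):
--     """
--     Build a generator G of the nullspace of H = [I_m | M] by scattering:
--     start from the identity block masks 1 << (k-1-j) and OR each entry of M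
--     into its final bit position (bit n-1-i of generator j), row-major.
--     """
--     k = len(M_rows[0]) if m > 0 else 0
--     n = m + k
--     G_rows = [1 << (k - 1 - j) for j in range(k)]
--     if k:
--         for i in range(m):
--             row_i = M_rows[i]
--             for j in range(k):
--                 G_rows[j] |= row_i[j] << (n - 1 - i)
--     return G_rows, n
-- ===== Notes on version B (the rewrite author's own statement) =====
-- stated objective: alternative
-- what changed: Replaces the gather-and-Horner construction (build each generator row as a list, then fold shift-or into a mask) by a scatter: initialize the k identity-block masks 1<<(k-1-j) and OR each matrix entry into its final bit position (bit n-1-i of generator j) while traversing M row-major, with no intermediate row lists.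
import Mathlib
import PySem

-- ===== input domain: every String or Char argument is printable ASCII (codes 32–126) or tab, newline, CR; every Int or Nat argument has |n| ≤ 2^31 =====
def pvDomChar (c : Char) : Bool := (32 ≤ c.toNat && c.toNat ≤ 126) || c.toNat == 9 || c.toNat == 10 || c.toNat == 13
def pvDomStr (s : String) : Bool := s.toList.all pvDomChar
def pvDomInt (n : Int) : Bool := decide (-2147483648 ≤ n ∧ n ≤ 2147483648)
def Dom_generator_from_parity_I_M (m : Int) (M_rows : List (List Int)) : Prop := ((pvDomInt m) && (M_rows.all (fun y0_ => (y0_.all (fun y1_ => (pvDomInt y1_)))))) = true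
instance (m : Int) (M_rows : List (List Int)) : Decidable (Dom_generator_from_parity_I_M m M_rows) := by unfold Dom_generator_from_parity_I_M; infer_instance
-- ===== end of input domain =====

-- B replaces the gather-and-Horner construction (build each row, then fold shift-or)
-- by a scatter: start from the identity-block masks and OR each matrix entry into its
-- final bit position, traversing M row-major (objective: alternative decomposition).


-- ===== PORT A =====
def generator_from_parity_I_M (m : Int) (M_rows : List (List Int)) : List Int × Int :=
  let k : Int := if m > 0 then (((PySem.List.pyGet? M_rows 0).getD []).length : Int) else 0
  let n : Int := m + k
  let G_rows : List Int := (PySem.List.pyRange 0 k 1).foldl (fun G j =>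
    let row : List Int := (PySem.List.pyRange 0 m 1).foldl (fun row i =>
      row ++ [(PySem.List.pyGet? ((PySem.List.pyGet? M_rows i).getD []) j).getD 0]) []
    let row : List Int := (PySem.List.pyRange 0 k 1).foldl (fun row t =>
      row ++ [if t == j then (1 : Int) else 0]) row
    let mask : Int := row.foldl (fun mask b => PySem.Int.bor (mask <<< (1 : Nat)) b) 0
    G ++ [mask]) []
  (G_rows, n)

-- ===== PORT B =====
def generator_from_parity_I_M_alt (m : Int) (M_rows : List (List Int)) : List Int × Int :=
  let k : Int := if m > 0 then (((PySem.List.pyGet? M_rows 0).getD []).length : Int) else 0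
  let n : Int := m + k
  let G0 : List Int := (PySem.List.pyRange 0 k 1).map (fun j => (1 : Int) <<< (k - 1 - j).toNat)
  let G : List Int :=
    if k ≠ 0 then
      (PySem.List.pyRange 0 m 1).foldl (fun G i =>
        let row_i := (PySem.List.pyGet? M_rows i).getD []
        (PySem.List.pyRange 0 k 1).foldl (fun G j =>
          G.set j.toNat (PySem.Int.bor (PySem.List.pyGetD G j 0)
            (((PySem.List.pyGet? row_i j).getD 0) <<< (n - 1 - i).toNat))) G) G0
    else G0
  (G, n)

-- ===== PRECONDITION & SPEC =====
-- Pre_ excludes exactly the inputs where the Python A raises IndexError: m > 0 with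
-- M_rows empty, or (when the first row is non-empty) fewer than m rows or one of the
-- first m rows shorter than the first row.
def Pre_generator_from_parity_I_M (m : Int) (M_rows : List (List Int)) : Prop :=
  0 < m → (M_rows ≠ [] ∧
    ((M_rows.headD []).length = 0 ∨
      (m ≤ (M_rows.length : Int) ∧
        ∀ r ∈ M_rows.take m.toNat, (M_rows.headD []).length ≤ r.length)))
instance (m : Int) (M_rows : List (List Int)) : Decidable (Pre_generator_from_parity_I_M m M_rows) := by unfold Pre_generator_from_parity_I_M; infer_instance
def pvWitness_generator_from_parity_I_M : Int × List (List Int) := (2, [[1, 0], [0, 1]])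
def Spec_generator_from_parity_I_M (m : Int) (M_rows : List (List Int)) (out : List Int × Int) : Prop := out = generator_from_parity_I_M_alt m M_rows
instance (m : Int) (M_rows : List (List Int)) (out : List Int × Int) : Decidable (Spec_generator_from_parity_I_M m M_rows out) := by unfold Spec_generator_from_parity_I_M; infer_instance

-- ===== CLAIM (what is proved, stated in full; the proofs are below) =====
def Claim_equal_generator_from_parity_I_M : Prop := ∀ (m : Int) (M_rows : List (List Int)), Dom_generator_from_parity_I_M m M_rows → Pre_generator_from_parity_I_M m M_rows → Spec_generator_from_parity_I_M m M_rows (generator_from_parity_I_M m M_rows)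

-- ===== LEMMAS AND PROOFS =====

-- bitwise groundwork -------------------------------------------------------

theorem ldiff_add_and : ∀ b a : ℕ, b.ldiff a + (b &&& a) = b := by
  intro b
  induction b using Nat.binaryRec with
  | zero => intro a; simp [Nat.ldiff]
  | bit bb b ih =>
    intro a
    rw [← Nat.bit_testBit_zero_shiftRight_one a, Nat.ldiff_bit, Nat.land_bit]
    cases bb <;> cases h : a.testBit 0 <;>
      simp [Nat.bit] <;> have := ih (a >>> 1) <;> omega

theorem bor_eq_lor (a b : Int) : PySem.Int.bor a b = Int.lor a b := by
  unfold PySem.Int.bor Int.lor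
  rcases a with a | a <;> rcases b with b | b <;> simp [Int.toNat] <;>
    first
      | (have := ldiff_add_and b a; omega)
      | (have := ldiff_add_and a b; omega)

theorem testBit_bor (a b : Int) (t : Nat) :
    (PySem.Int.bor a b).testBit t = (a.testBit t || b.testBit t) := by
  rw [bor_eq_lor]; exact Int.testBit_lor a b t

theorem int_testBit_shiftLeft (a : Int) (s t : Nat) :
    (a <<< s).testBit t = (decide (s ≤ t) && a.testBit (t - s)) := by
  rcases a with a | a
  · have hdef : (Int.ofNat a) <<< s = Int.ofNat (a <<< s) := rfl
    rw [hdef]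
    simp [Int.testBit, Nat.testBit_shiftLeft]
  · have hdef : (Int.negSucc a) <<< s = Int.negSucc ((a + 1) <<< s - 1) := rfl
    have h2 : (1:Nat) ≤ 2 ^ s := Nat.one_le_two_pow
    have h1 : (a + 1) <<< s - 1 = 2 ^ s * a + (2 ^ s - 1) := by
      rw [Nat.shiftLeft_eq]
      have hx : (a + 1) * 2 ^ s = a * 2 ^ s + 2 ^ s := by ring
      have hy : 2 ^ s * a = a * 2 ^ s := by ring
      omega
    have h3 : 2 ^ s - 1 < 2 ^ s := by omega
    rw [hdef]
    simp only [Int.testBit, h1, Nat.testBit_two_pow_mul_add a h3 t]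
    by_cases hst : s ≤ t
    · simp [hst, if_neg (by omega : ¬ t < s)]
    · simp [hst, if_pos (by omega : t < s), Nat.testBit_two_pow_sub_one]
      omega

theorem int_eq_of_testBit_eq {a b : Int} (h : ∀ t, a.testBit t = b.testBit t) : a = b := by
  rcases a with a | a <;> rcases b with b | b
  · exact congrArg _ (Nat.eq_of_testBit_eq fun t => h t)
  · exfalso
    have ha : a.testBit (a + b) = false := Nat.testBit_eq_false_of_lt
      (lt_of_lt_of_le Nat.lt_two_pow_self (Nat.pow_le_pow_right (by norm_num) (by omega)))
    have hb : b.testBit (a + b) = false := Nat.testBit_eq_false_of_lt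
      (lt_of_lt_of_le Nat.lt_two_pow_self (Nat.pow_le_pow_right (by norm_num) (by omega)))
    have hh := h (a + b)
    rw [show (Int.ofNat a).testBit (a + b) = a.testBit (a + b) from rfl,
        show (Int.negSucc b).testBit (a + b) = !b.testBit (a + b) from rfl,
        ha, hb] at hh
    simp at hh
  · exfalso
    have ha : a.testBit (a + b) = false := Nat.testBit_eq_false_of_lt
      (lt_of_lt_of_le Nat.lt_two_pow_self (Nat.pow_le_pow_right (by norm_num) (by omega)))
    have hb : b.testBit (a + b) = false := Nat.testBit_eq_false_of_lt
      (lt_of_lt_of_le Nat.lt_two_pow_self (Nat.pow_le_pow_right (by norm_num) (by omega)))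
    have hh := h (a + b)
    rw [show (Int.negSucc a).testBit (a + b) = !a.testBit (a + b) from rfl,
        show (Int.ofNat b).testBit (a + b) = b.testBit (a + b) from rfl,
        ha, hb] at hh
    simp at hh
  · have : a = b := Nat.eq_of_testBit_eq fun t => by
      have hh := h t
      rw [show (Int.negSucc a).testBit t = !a.testBit t from rfl,
          show (Int.negSucc b).testBit t = !b.testBit t from rfl] at hh
      simpa using hh
    simp [this]

theorem bor_assoc (a b c : Int) :
    PySem.Int.bor (PySem.Int.bor a b) c = PySem.Int.bor a (PySem.Int.bor b c) := by
  apply int_eq_of_testBit_eq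
  intro t
  simp [testBit_bor, Bool.or_assoc]

theorem shl_bor (a b : Int) (s : Nat) :
    (PySem.Int.bor a b) <<< s = PySem.Int.bor (a <<< s) (b <<< s) := by
  apply int_eq_of_testBit_eq
  intro t
  simp [testBit_bor, int_testBit_shiftLeft, Bool.and_or_distrib_left]

theorem shl_shl (a : Int) (s t : Nat) : (a <<< s) <<< t = a <<< (s + t) :=
  Eq.symm (Int.shiftLeft_add a s t)

theorem bor_zero_left (a : Int) : PySem.Int.bor 0 a = a := by
  rw [PySem.Int.bor_comm]; exact PySem.Int.bor_zero a

-- generic fold lemmas ------------------------------------------------------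

theorem foldl_app {α β : Type} (f : β → α) :
    ∀ (l : List β) (acc : List α),
      l.foldl (fun G x => G ++ [f x]) acc = acc ++ l.map f := by
  intro l
  induction l with
  | nil => simp
  | cons x xs ih => intro acc; simp [List.foldl_cons, ih]

theorem fold_bor_init {α : Type} (u : α → Int) :
    ∀ (l : List α) (c : Int),
      l.foldl (fun acc x => PySem.Int.bor acc (u x)) c
        = PySem.Int.bor c (l.foldl (fun acc x => PySem.Int.bor acc (u x)) 0) := by
  intro l
  induction l with
  | nil => simp [PySem.Int.bor_zero]
  | cons x xs ih =>
    intro c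
    simp only [List.foldl_cons]
    rw [ih (PySem.Int.bor c (u x)), ih (PySem.Int.bor 0 (u x)), bor_zero_left,
      bor_assoc]

theorem shift_fold {α : Type} (u : α → Int) (K : Nat) :
    ∀ (l : List α) (c : Int),
      (l.foldl (fun acc x => PySem.Int.bor acc (u x)) c) <<< K
        = l.foldl (fun acc x => PySem.Int.bor acc (u x <<< K)) (c <<< K) := by
  intro l
  induction l with
  | nil => simp
  | cons x xs ih =>
    intro c
    simp only [List.foldl_cons]
    rw [ih, shl_bor]

-- Horner-step characterisations (A side) -----------------------------------

theorem zeros_fold : ∀ (L : Nat) (acc : Int),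
    ((List.range L).map (fun _ => (0 : Int))).foldl
      (fun mask b => PySem.Int.bor (mask <<< (1 : Nat)) b) acc = acc <<< L := by
  intro L
  induction L with
  | zero => intro acc; simp [Int.shiftLeft_zero]
  | succ L ih =>
    intro acc
    rw [List.range_succ, List.map_append, List.foldl_append, ih]
    simp [PySem.Int.bor_zero, shl_shl]

theorem id_horner : ∀ (K jn : Nat), jn < K → ∀ (acc : Int),
    ((List.range K).map (fun t => if t = jn then (1 : Int) else 0)).foldl
      (fun mask b => PySem.Int.bor (mask <<< (1 : Nat)) b) acc
      = PySem.Int.bor (acc <<< K) ((1 : Int) <<< (K - 1 - jn)) := by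
  intro K
  induction K with
  | zero => intro jn h; omega
  | succ K ih =>
    intro jn h acc
    rw [List.range_succ, List.map_append, List.foldl_append]
    simp only [List.map_cons, List.map_nil, List.foldl_cons, List.foldl_nil]
    by_cases hj : jn = K
    · subst hj
      have : ((List.range jn).map (fun t => if t = jn then (1 : Int) else 0))
          = (List.range jn).map (fun _ => (0 : Int)) := by
        apply List.map_congr_left
        intro t ht
        simp [List.mem_range] at ht
        simp [Nat.ne_of_lt ht]
      rw [this, zeros_fold]
      simp [shl_shl, Int.shiftLeft_zero]
    · have hlt : jn < K := by omega
      rw [ih jn hlt acc]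
      have hK : (K : Nat) ≠ jn := fun hc => hj hc.symm
      rw [if_neg hK, PySem.Int.bor_zero, shl_bor, shl_shl, shl_shl]
      congr 2
      omega

theorem horner_range : ∀ (L : Nat) (a : Nat → Int),
    ((List.range L).map a).foldl
      (fun mask b => PySem.Int.bor (mask <<< (1 : Nat)) b) 0
      = (List.range L).foldl (fun acc p => PySem.Int.bor acc (a p <<< (L - 1 - p))) 0 := by
  intro L
  induction L with
  | zero => intro a; simp
  | succ L ih =>
    intro a
    rw [List.range_succ, List.map_append, List.foldl_append, ih a,
      List.foldl_append]
    simp only [List.map_cons, List.map_nil, List.foldl_cons, List.foldl_nil]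
    rw [shift_fold, Int.zero_shiftLeft]
    rw [PySem.List.foldl_congr_mem (List.range L)
      (fun acc p => PySem.Int.bor acc (a p <<< (L - 1 - p) <<< (1 : Nat)))
      (fun acc p => PySem.Int.bor acc (a p <<< (L + 1 - 1 - p))) 0
      (by
        intro acc p hp
        simp only [List.mem_range] at hp
        simp only [shl_shl]
        have he : L - 1 - p + 1 = L + 1 - 1 - p := by omega
        rw [he])]
    congr 1
    simp [Int.shiftLeft_zero]

-- scatter characterisation (B side) ----------------------------------------

theorem inner_set (v : Int → Int) : ∀ (K : Nat) (g : Nat → Int) (tail : List Int),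
    (PySem.List.pyRange 0 (K : Int) 1).foldl
      (fun G j => G.set j.toNat (PySem.Int.bor (PySem.List.pyGetD G j 0) (v j)))
      ((List.range K).map g ++ tail)
      = (List.range K).map (fun j => PySem.Int.bor (g j) (v (j : Int))) ++ tail := by
  intro K
  induction K with
  | zero => intro g tail; simp [PySem.List.pyRange]
  | succ K ih =>
    intro g tail
    have hcast : ((K + 1 : Nat) : Int) = (K : Int) + 1 := by push_cast; ring
    rw [hcast, PySem.List.pyRange_one_succ_right (by positivity), List.foldl_append,
      List.range_succ, List.map_append, List.map_append]
    simp only [List.map_cons, List.map_nil]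
    rw [List.append_assoc, List.singleton_append, ih g ((g K) :: tail),
      List.foldl_cons, List.foldl_nil]
    have hlen : ((List.range K).map (fun j => PySem.Int.bor (g j) (v (j : Int)))).length = K := by simp
    have hget : PySem.List.pyGetD
        ((List.range K).map (fun j => PySem.Int.bor (g j) (v (j : Int)))
          ++ ((g K) :: tail)) (K : Int) 0 = g K := by
      rw [PySem.List.pyGetD_eq_getElem _ 0 (by positivity) (by simp)]
      simp [List.getElem_append_right, hlen]
    rw [hget, Int.toNat_natCast,
      List.set_append_right K _ (by simp), hlen]
    simp

theorem outer_scatter (w : Int → Int → Int) (K : Nat) :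
    ∀ (is : List Int) (g : Nat → Int),
      is.foldl (fun G i =>
          (PySem.List.pyRange 0 (K : Int) 1).foldl
            (fun G j => G.set j.toNat
              (PySem.Int.bor (PySem.List.pyGetD G j 0) (w i j))) G)
        ((List.range K).map g)
      = (List.range K).map (fun j =>
          is.foldl (fun acc i => PySem.Int.bor acc (w i ((j : Nat) : Int))) (g j)) := by
  intro is
  induction is with
  | nil => intro g; simp
  | cons i is ih =>
    intro g
    simp only [List.foldl_cons]
    have h := inner_set (w i) K g []
    simp only [List.append_nil] at h
    rw [h, ih]

theorem outer_scatter' (w : Int → Int → Int) (K : Nat) (is : List Int) (g0 : Int → Int) :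
    is.foldl (fun G i =>
        (PySem.List.pyRange 0 (K : Int) 1).foldl
          (fun G j => G.set j.toNat
            (PySem.Int.bor (PySem.List.pyGetD G j 0) (w i j))) G)
      ((PySem.List.pyRange 0 (K : Int) 1).map g0)
    = (PySem.List.pyRange 0 (K : Int) 1).map (fun j =>
        is.foldl (fun acc i => PySem.Int.bor acc (w i j)) (g0 j)) := by
  have h1 : (PySem.List.pyRange 0 (K : Int) 1).map g0
      = (List.range K).map (fun p => g0 ((p : Nat) : Int)) := by
    rw [PySem.List.pyRange_one, List.map_map]
    simp
  have h2 : (PySem.List.pyRange 0 (K : Int) 1).map (fun j =>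
        is.foldl (fun acc i => PySem.Int.bor acc (w i j)) (g0 j))
      = (List.range K).map (fun p =>
        is.foldl (fun acc i => PySem.Int.bor acc (w i ((p : Nat) : Int))) (g0 ((p : Nat) : Int))) := by
    rw [PySem.List.pyRange_one, List.map_map]
    simp
  rw [h1, h2, outer_scatter w K is (fun p => g0 ((p : Nat) : Int))]

theorem cast_sub_toNat (K jn : Nat) (hj : jn < K) :
    ((K : Int) - 1 - (jn : Int)).toNat = K - 1 - jn := by omega

theorem mask_eq (M_rows : List (List Int)) (M' K : Nat) (jn : Nat) (hj : jn < K) :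
    ((PySem.List.pyRange 0 (M' : Int) 1).map (fun i =>
        (PySem.List.pyGet? ((PySem.List.pyGet? M_rows i).getD []) ((jn : Nat) : Int)).getD 0)
      ++ (PySem.List.pyRange 0 (K : Int) 1).map (fun t => if t == ((jn : Nat) : Int) then (1 : Int) else 0)).foldl
        (fun mask b => PySem.Int.bor (mask <<< (1 : Nat)) b) 0
    = (PySem.List.pyRange 0 (M' : Int) 1).foldl
        (fun acc i => PySem.Int.bor acc
          ((PySem.List.pyGet? ((PySem.List.pyGet? M_rows i).getD []) ((jn : Nat) : Int)).getD 0
            <<< (((M' : Int) + (K : Int)) - 1 - i).toNat))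
        ((1 : Int) <<< (((K : Int) - 1 - ((jn : Nat) : Int)).toNat)) := by
  have hid : (PySem.List.pyRange 0 (K : Int) 1).map (fun t => if t == ((jn : Nat) : Int) then (1 : Int) else 0)
      = (List.range K).map (fun t => if t = jn then (1 : Int) else 0) := by
    rw [PySem.List.pyRange_one, List.map_map]
    simp only [Int.sub_zero, Int.toNat_natCast]
    apply List.map_congr_left
    intro t _
    simp [beq_iff_eq]
  have hcol : (PySem.List.pyRange 0 (M' : Int) 1).map (fun i =>
        (PySem.List.pyGet? ((PySem.List.pyGet? M_rows i).getD []) ((jn : Nat) : Int)).getD 0)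
      = (List.range M').map (fun p =>
        (PySem.List.pyGet? ((PySem.List.pyGet? M_rows ((p : Nat) : Int)).getD []) ((jn : Nat) : Int)).getD 0) := by
    rw [PySem.List.pyRange_one, List.map_map]
    simp
  rw [List.foldl_append, hid, id_horner K jn hj, hcol, horner_range M']
  rw [cast_sub_toNat K jn hj]
  -- RHS: convert the pyRange fold to a range fold and split off the init
  conv_rhs => rw [PySem.List.pyRange_one, List.foldl_map]
  simp only [Int.sub_zero, Int.toNat_natCast, zero_add]
  conv_rhs => rw [fold_bor_init]
  rw [PySem.Int.bor_comm]
  congr 1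
  rw [shift_fold]
  rw [Int.zero_shiftLeft]
  apply PySem.List.foldl_congr_mem
  intro acc p hp
  simp only [List.mem_range] at hp
  rw [shl_shl]
  congr 2
  omega

-- ===== VERDICT (by name: the statement is the Claim_ definition above) =====
theorem generator_from_parity_I_M_spec : Claim_equal_generator_from_parity_I_M := by
  intro m M_rows _dom _pre
  unfold Spec_generator_from_parity_I_M generator_from_parity_I_M generator_from_parity_I_M_alt
  dsimp only
  generalize hkdef : (if m > 0 then (((PySem.List.pyGet? M_rows 0).getD []).length : Int) else 0) = k
  by_cases hk0 : k = 0
  · subst hk0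
    have h0 : PySem.List.pyRange 0 (0 : Int) 1 = [] := by
      rw [PySem.List.pyRange_one]; simp
    simp [h0]
  · have hm : 0 < m := by
      by_contra hmn
      rw [if_neg (by omega : ¬ m > 0)] at hkdef
      exact hk0 hkdef.symm
    have hknn : 0 ≤ k := by
      rw [← hkdef]
      split_ifs <;> positivity
    obtain ⟨K, hK⟩ : ∃ K : Nat, ((K : Nat) : Int) = k := ⟨k.toNat, Int.toNat_of_nonneg hknn⟩
    obtain ⟨M', hM⟩ : ∃ M' : Nat, ((M' : Nat) : Int) = m := ⟨m.toNat, Int.toNat_of_nonneg (le_of_lt hm)⟩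
    subst hK
    subst hM
    rw [if_pos hk0]
    simp only [foldl_app, List.nil_append]
    rw [outer_scatter' (fun i j =>
        ((PySem.List.pyGet? ((PySem.List.pyGet? M_rows i).getD []) j).getD 0)
          <<< (((M' : Int) + (K : Int)) - 1 - i).toNat) K
      (PySem.List.pyRange 0 ((M' : Nat) : Int) 1)
      (fun j => (1 : Int) <<< (((K : Int) - 1 - j).toNat))]
    congr 1
    apply List.map_congr_left
    intro j hj
    rw [PySem.List.mem_pyRange_one] at hj
    lift j to Nat using hj.1 with jn
    have hjn : jn < K := by exact_mod_cast hj.2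
    exact mask_eq M_rows M' K jn hjn
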